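-- pv_equiv track=rewrite | github.com/a-johnston/advent2023 | day11/main.py | parse
-- ===== SOURCE A (Python) =====
-- def cumulative(vals, to, offset):
--     v = 0
--     l = [0] * to
--     for i in range(to):
--         if i in vals:
--             v += offset
--         l[i] = v
--     return l
--
-- def parse(lines, offset):
--     galaxies = []
--     empty_x = set(range(len(lines[0])))
--     empty_y = set(range(len(lines)))
--     for y, line in enumerate(lines):
--         for x, c in enumerate(line):
--             if c == '#':
--                 if x in empty_x:
--                     empty_x.remove(x)
--                 if y in empty_y:
--                     empty_y.remove(y)
--                 galaxies.append([x, y])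
--     offset_x = cumulative(empty_x, len(lines[0]), offset)
--     offset_y = cumulative(empty_y, len(lines), offset)
--     for galaxy in galaxies:
--         galaxy[0] += offset_x[galaxy[0]]
--         galaxy[1] += offset_y[galaxy[1]]
--     return galaxies
-- ===== SOURCE B (Python) =====
-- def parse(lines, offset):
--     width = len(lines[0])
--     empty_cols = [c for c in range(width)
--                   if all(c >= len(line) or line[c] != '#' for line in lines)]
--     empty_rows = [y for y, line in enumerate(lines) if '#' not in line]
--     galaxies = []
--     for y, line in enumerate(lines):
--         for x, ch in enumerate(line):
--             if ch == '#':
--                 galaxies.append([x + offset * len([e for e in empty_cols if e < x]),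
--                                  y + offset * len([r for r in empty_rows if r < y])])
--     return galaxies
-- ===== Notes on version B (the rewrite author's own statement) =====
-- stated objective: simpler
-- what changed: B drops A's mutable empty-row/empty-column sets and the cumulative prefix-offset tables: it builds the lists of empty columns and empty rows by direct comprehensions and, per galaxy, adds offset times the count of empty columns/rows strictly below its coordinate.
import Mathlib
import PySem

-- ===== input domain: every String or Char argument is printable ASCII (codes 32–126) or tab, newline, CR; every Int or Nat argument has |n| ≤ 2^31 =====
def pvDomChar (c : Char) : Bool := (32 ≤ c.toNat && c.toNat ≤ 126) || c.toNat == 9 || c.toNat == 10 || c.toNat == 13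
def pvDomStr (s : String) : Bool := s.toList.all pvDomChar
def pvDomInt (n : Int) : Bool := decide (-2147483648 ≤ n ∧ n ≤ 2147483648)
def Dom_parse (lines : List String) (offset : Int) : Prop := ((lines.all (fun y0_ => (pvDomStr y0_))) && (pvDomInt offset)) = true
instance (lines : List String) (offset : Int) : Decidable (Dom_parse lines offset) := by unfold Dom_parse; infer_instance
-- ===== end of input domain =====

-- B replaces A's mutable empty-row/column sets and cumulative prefix-offset tables by direct
-- comprehensions and a per-galaxy count of empty columns/rows below each coordinate (simpler).


-- ===== PORT A =====
-- helpers cumulative/parseStep/parseRow mirror A's cumulative() and the body of its two nested loops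
def cumulative (vals : PySem.Set Int) (to_ : Int) (offset : Int) : List Int :=
  ((PySem.List.pyRange 0 to_ 1).foldl
    (fun (s : Int × List Int) i =>
      let v := if PySem.Set.contains vals i then s.1 + offset else s.1
      (v, s.2.set i.toNat v))
    (0, List.replicate to_.toNat 0)).2

def parseStep (y : Int) (st : List (List Int) × PySem.Set Int × PySem.Set Int)
    (xc : Int × Char) : List (List Int) × PySem.Set Int × PySem.Set Int :=
  if xc.2 = '#' then
    let ex := if PySem.Set.contains st.2.1 xc.1
              then (PySem.Set.remove? st.2.1 xc.1).getD st.2.1 else st.2.1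
    let ey := if PySem.Set.contains st.2.2 y
              then (PySem.Set.remove? st.2.2 y).getD st.2.2 else st.2.2
    (st.1 ++ [[xc.1, y]], ex, ey)
  else st

def parseRow (st : List (List Int) × PySem.Set Int × PySem.Set Int)
    (yl : Int × String) : List (List Int) × PySem.Set Int × PySem.Set Int :=
  (PySem.List.enumerate yl.2.toList 0).foldl (parseStep yl.1) st

def parse (lines : List String) (offset : Int) : List (List Int) :=
  let w : Int := PySem.Str.len (lines.headD "")
  let st := (PySem.List.enumerate lines 0).foldl parseRow
    ([], PySem.Set.ofList (PySem.List.pyRange 0 w 1),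
         PySem.Set.ofList (PySem.List.pyRange 0 (PySem.List.len lines) 1))
  let offx := cumulative st.2.1 w offset
  let offy := cumulative st.2.2 (PySem.List.len lines) offset
  st.1.map (fun g =>
    let x := PySem.List.pyGetD g 0 0
    let y := PySem.List.pyGetD g 1 0
    [x + PySem.List.pyGetD offx x 0, y + PySem.List.pyGetD offy y 0])

-- ===== PORT B =====
def parse_alt (lines : List String) (offset : Int) : List (List Int) :=
  let w : Int := PySem.Str.len (lines.headD "")
  let emptyCols : List Int := (PySem.List.pyRange 0 w 1).filter
    (fun c => lines.all (fun line =>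
      decide (PySem.Str.len line ≤ c) || decide (PySem.List.pyGetD line.toList c ' ' ≠ '#')))
  let emptyRows : List Int := ((PySem.List.enumerate lines 0).filter
    (fun yl => !(yl.2.toList.contains '#'))).map (·.1)
  (PySem.List.enumerate lines 0).foldl
    (fun acc yl =>
      (PySem.List.enumerate yl.2.toList 0).foldl
        (fun acc xc =>
          if xc.2 = '#' then
            acc ++ [[xc.1 + offset * ((emptyCols.filter (fun e => decide (e < xc.1))).length : Int),
                     yl.1 + offset * ((emptyRows.filter (fun r => decide (r < yl.1))).length : Int)]]
          else acc) acc)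
    []

-- ===== PRECONDITION & SPEC =====
-- Pre_parse excludes exactly the inputs on which A raises IndexError: empty `lines`
-- (lines[0]) and grids where some line has '#' at an index ≥ len(lines[0]) (offset_x lookup).
def Pre_parse (lines : List String) (offset : Int) : Prop :=
  lines ≠ [] ∧ ∀ line ∈ lines, '#' ∉ line.toList.drop (lines.headD "").toList.length
instance (lines : List String) (offset : Int) : Decidable (Pre_parse lines offset) := by
  unfold Pre_parse; infer_instance
def pvWitness_parse : List String × Int := ([".#.", "...", "#.#"], 10)
def Spec_parse (lines : List String) (offset : Int) (out : List (List Int)) : Prop := out = parse_alt lines offset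
instance (lines : List String) (offset : Int) (out : List (List Int)) : Decidable (Spec_parse lines offset out) := by unfold Spec_parse; infer_instance

-- ===== CLAIM (what is proved, stated in full; the proofs are below) =====
def Claim_equal_parse : Prop := ∀ (lines : List String) (offset : Int), Dom_parse lines offset → Pre_parse lines offset → Spec_parse lines offset (parse lines offset)

-- ===== LEMMAS AND PROOFS =====

-- proof-layer definitions
def pvRowCells (y : Int) (cs : List Char) (x0 : Int) : List (Int × Int) :=
  ((PySem.List.enumerate cs x0).filter (fun xc => decide (xc.2 = '#'))).map
    (fun xc => (xc.1, y))

def pvCells (lines : List String) (y0 : Int) : List (Int × Int) :=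
  (PySem.List.enumerate lines y0).flatMap (fun yl => pvRowCells yl.1 yl.2.toList 0)

lemma pv_step (s : PySem.Set Int) (x : Int) :
    (if PySem.Set.contains s x then (PySem.Set.remove? s x).getD s else s)
      = PySem.Set.discard s x := by
  by_cases h : x ∈ s
  · rw [if_pos ((PySem.Set.contains_iff s x).mpr h), PySem.Set.remove?_of_mem h,
      Option.getD_some]
  · rw [if_neg (by simp [PySem.Set.contains_iff, h])]
    exact (List.filter_eq_self.mpr (fun y hy => by
      have hne : y ≠ x := fun hxy => h (hxy ▸ hy)
      simp [hne])).symm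

lemma pvRowCells_cons (y : Int) (c : Char) (cs : List Char) (x0 : Int) :
    pvRowCells y (c :: cs) x0
      = (if c = '#' then [(x0, y)] else []) ++ pvRowCells y cs (x0 + 1) := by
  by_cases h : c = '#' <;>
    simp [pvRowCells, PySem.List.enumerate_cons, List.filter_cons, h]

lemma pv_inner (y x0 : Int) (cs : List Char) (g : List (List Int))
    (ex ey : PySem.Set Int) :
    (PySem.List.enumerate cs x0).foldl (parseStep y) (g, ex, ey)
      = (g ++ (pvRowCells y cs x0).map (fun p => [p.1, p.2]),
         (pvRowCells y cs x0).foldl (fun t p => PySem.Set.discard t p.1) ex,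
         (pvRowCells y cs x0).foldl (fun t p => PySem.Set.discard t p.2) ey) := by
  induction cs generalizing x0 g ex ey with
  | nil => simp [pvRowCells]
  | cons c cs ih =>
    rw [PySem.List.enumerate_cons, List.foldl_cons, pvRowCells_cons]
    by_cases hc : c = '#'
    · have hstep : parseStep y (g, ex, ey) (x0, c)
          = (g ++ [[x0, y]], PySem.Set.discard ex x0, PySem.Set.discard ey y) := by
        simp only [parseStep, hc, if_pos, pv_step]
      rw [hstep, ih]
      simp [hc]
    · have hstep : parseStep y (g, ex, ey) (x0, c) = (g, ex, ey) := by
        simp [parseStep, hc]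
      rw [hstep, ih]
      simp [hc]

lemma pv_scan (lines : List String) (y0 : Int) (g : List (List Int))
    (ex ey : PySem.Set Int) :
    (PySem.List.enumerate lines y0).foldl parseRow (g, ex, ey)
      = (g ++ (pvCells lines y0).map (fun p => [p.1, p.2]),
         (pvCells lines y0).foldl (fun t p => PySem.Set.discard t p.1) ex,
         (pvCells lines y0).foldl (fun t p => PySem.Set.discard t p.2) ey) := by
  induction lines generalizing y0 g ex ey with
  | nil => simp [pvCells]
  | cons l ls ih =>
    rw [PySem.List.enumerate_cons, List.foldl_cons,
      show parseRow (g, ex, ey) (y0, l)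
          = (g ++ (pvRowCells y0 l.toList 0).map (fun p => [p.1, p.2]),
             (pvRowCells y0 l.toList 0).foldl (fun t p => PySem.Set.discard t p.1) ex,
             (pvRowCells y0 l.toList 0).foldl (fun t p => PySem.Set.discard t p.2) ey)
        from pv_inner y0 0 l.toList g ex ey,
      ih]
    simp [pvCells, PySem.List.enumerate_cons, List.foldl_append]

lemma mem_foldl_discard (l : List (Int × Int)) (f : Int × Int → Int)
    (s : PySem.Set Int) (a : Int) :
    a ∈ l.foldl (fun t p => PySem.Set.discard t (f p)) s ↔ a ∈ s ∧ ∀ p ∈ l, a ≠ f p := by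
  induction l generalizing s with
  | nil => simp
  | cons q qs ih =>
    simp only [List.foldl_cons, ih, PySem.Set.mem_discard, List.mem_cons]
    constructor
    · rintro ⟨⟨h1, h2⟩, h3⟩
      exact ⟨h1, by rintro p (rfl | hp); exact h2; exact h3 p hp⟩
    · rintro ⟨h1, h2⟩
      exact ⟨⟨h1, h2 q (Or.inl rfl)⟩, fun p hp => h2 p (Or.inr hp)⟩

def pvCnt (vals : List Int) (k : Int) : Int :=
  ((PySem.List.pyRange 0 k 1).countP (fun j => decide (j ∈ vals)) : Int)

lemma pvCnt_succ (vals : List Int) (k : Int) (hk : 0 ≤ k) :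
    pvCnt vals (k + 1) = pvCnt vals k + (if k ∈ vals then 1 else 0) := by
  unfold pvCnt
  rw [PySem.List.pyRange_one_succ_right hk]
  by_cases h : k ∈ vals <;>
    simp [List.countP_append, List.countP_cons, h]

lemma cum_inv (vals : PySem.Set Int) (offset : Int) (N : Nat) :
    ∀ k : Nat, k ≤ N →
    (PySem.List.pyRange 0 (k : Int) 1).foldl
      (fun (s : Int × List Int) i =>
        let v := if PySem.Set.contains vals i then s.1 + offset else s.1
        (v, s.2.set i.toNat v))
      (0, List.replicate N 0)
    = (offset * pvCnt vals k,
       (PySem.List.pyRange 0 (k : Int) 1).map (fun i => offset * pvCnt vals (i + 1))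
         ++ List.replicate (N - k) 0) := by
  intro k hk
  induction k with
  | zero =>
    simp [pvCnt, PySem.List.pyRange_one_eq_nil le_rfl]
  | succ k ih =>
    have hk' : k ≤ N := Nat.le_of_succ_le hk
    have hcast : ((k + 1 : Nat) : Int) = (k : Int) + 1 := by push_cast; ring
    rw [hcast, PySem.List.pyRange_one_succ_right (by positivity), List.foldl_append,
      ih hk', List.map_append]
    simp only [List.foldl_cons, List.foldl_nil, List.map_cons, List.map_nil]
    have hv : (if (k : Int) ∈ (vals : List Int) then offset * pvCnt vals k + offset
        else offset * pvCnt vals k) = offset * pvCnt vals ((k : Int) + 1) := by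
      rw [pvCnt_succ vals (k : Int) (by positivity)]
      by_cases h : (k : Int) ∈ (vals : List Int) <;> simp [h] <;> ring
    have hlen : ((PySem.List.pyRange 0 (k : Int) 1).map
        (fun i => offset * pvCnt vals (i + 1))).length = k := by
      simp [PySem.List.length_pyRange_one]
    have hrep : N - k = (N - (k + 1)) + 1 := by omega
    refine Prod.ext ?_ ?_
    · simpa using hv
    · simp only []
      rw [Int.toNat_natCast, List.set_append, hlen, if_neg (by omega), Nat.sub_self,
        hrep, List.replicate_succ, List.set_cons_zero]
      simp only [List.append_assoc, List.cons_append, List.nil_append]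
      simp [hv]

lemma cum_eq (vals : PySem.Set Int) (offset : Int) (N : Nat) :
    cumulative vals (N : Int) offset
      = (PySem.List.pyRange 0 (N : Int) 1).map (fun i => offset * pvCnt vals (i + 1)) := by
  unfold cumulative
  rw [Int.toNat_natCast, cum_inv vals offset N N le_rfl]
  simp

lemma cum_get (vals : PySem.Set Int) (offset : Int) (N : Nat) (x : Int)
    (h0 : 0 ≤ x) (h1 : x < (N : Int)) :
    PySem.List.pyGetD (cumulative vals (N : Int) offset) x 0
      = offset * pvCnt vals (x + 1) := by
  rw [cum_eq, PySem.List.pyGetD_map_pyRange_of_nonneg _ _ _ _ h0 h1]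

lemma mem_pvRowCells (y x0 : Int) (cs : List Char) (p : Int × Int) :
    p ∈ pvRowCells y cs x0 ↔
      p.2 = y ∧ ∃ (k : Nat) (_ : k < cs.length), p.1 = x0 + k ∧ cs[k] = '#' := by
  simp only [pvRowCells, List.mem_map, List.mem_filter, PySem.List.mem_enumerate_iff]
  constructor
  · rintro ⟨xc, ⟨⟨k, hk, rfl⟩, hh⟩, rfl⟩
    simp only [decide_eq_true_eq] at hh
    exact ⟨rfl, k, hk, rfl, hh⟩
  · rintro ⟨h2, k, hk, h1, hh⟩
    exact ⟨(x0 + k, cs[k]), ⟨⟨k, hk, rfl⟩, by simp [hh]⟩, by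
      cases p; simp_all⟩

lemma mem_pvCells (lines : List String) (p : Int × Int) :
    p ∈ pvCells lines 0 ↔
      ∃ (r : Nat) (_ : r < lines.length), p.2 = (r : Int) ∧
        ∃ (k : Nat) (_ : k < (lines[r]).toList.length),
          p.1 = (k : Int) ∧ (lines[r]).toList[k] = '#' := by
  simp only [pvCells, List.mem_flatMap, PySem.List.mem_enumerate_iff]
  constructor
  · rintro ⟨yl, ⟨r, hr, rfl⟩, hmem⟩
    rw [mem_pvRowCells] at hmem
    obtain ⟨h2, k, hk, h1, hh⟩ := hmem
    exact ⟨r, hr, by simpa using h2, k, hk, by simpa using h1, hh⟩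
  · rintro ⟨r, hr, h2, k, hk, h1, hh⟩
    exact ⟨((r : Int), lines[r]), ⟨r, hr, by simp⟩, by
      rw [mem_pvRowCells]
      exact ⟨by simpa using h2, k, hk, by simpa using h1, hh⟩⟩

lemma mem_cellXs (lines : List String) (j : Int) :
    j ∈ (pvCells lines 0).map (·.1) ↔
      ∃ line ∈ lines, ∃ (k : Nat) (_ : k < line.toList.length),
        j = (k : Int) ∧ line.toList[k] = '#' := by
  simp only [List.mem_map]
  constructor
  · rintro ⟨p, hp, rfl⟩
    obtain ⟨r, hr, _, k, hk, h1, hh⟩ := (mem_pvCells lines p).mp hp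
    exact ⟨lines[r], List.getElem_mem hr, k, hk, h1, hh⟩
  · rintro ⟨line, hline, k, hk, rfl, hh⟩
    obtain ⟨r, hr, rfl⟩ := List.mem_iff_getElem.mp hline
    exact ⟨((k : Int), (r : Int)), (mem_pvCells lines _).mpr ⟨r, hr, rfl, k, hk, rfl, hh⟩, rfl⟩

lemma mem_cellYs (lines : List String) (j : Int) :
    j ∈ (pvCells lines 0).map (·.2) ↔
      ∃ (r : Nat) (_ : r < lines.length), j = (r : Int) ∧ '#' ∈ (lines[r]).toList := by
  simp only [List.mem_map]
  constructor
  · rintro ⟨p, hp, rfl⟩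
    obtain ⟨r, hr, h2, k, hk, _, hh⟩ := (mem_pvCells lines p).mp hp
    exact ⟨r, hr, h2, hh ▸ List.getElem_mem hk⟩
  · rintro ⟨r, hr, rfl, hh⟩
    obtain ⟨k, hk, hk2⟩ := List.mem_iff_getElem.mp hh
    exact ⟨((k : Int), (r : Int)), (mem_pvCells lines _).mpr ⟨r, hr, rfl, k, hk, rfl, hk2⟩, rfl⟩

lemma colB_iff (lines : List String) (j : Int) (hj : 0 ≤ j) :
    ((lines.all (fun line =>
        decide (PySem.Str.len line ≤ j) ||
          decide (PySem.List.pyGetD line.toList j ' ' ≠ '#'))) = true)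
      ↔ j ∉ (pvCells lines 0).map (·.1) := by
  rw [mem_cellXs]
  simp only [List.all_eq_true, Bool.or_eq_true, decide_eq_true_eq]
  constructor
  · rintro h ⟨line, hline, k, hk, rfl, hh⟩
    rcases h line hline with hle | hne
    · rw [PySem.Str.len_eq] at hle; omega
    · exact hne (by
        rw [PySem.List.pyGetD_eq_getElem line.toList ' ' (by positivity)
          (by exact_mod_cast hk)]
        simpa using hh)
  · intro h line hline
    by_cases hlt : j < PySem.Str.len line
    · right
      intro hh
      have hjn : j.toNat < line.toList.length := by
        rw [PySem.Str.len_eq] at hlt; omega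
      refine h ⟨line, hline, j.toNat, hjn, by omega, ?_⟩
      rw [PySem.List.pyGetD_eq_getElem line.toList ' ' hj (by
        rw [PySem.Str.len_eq] at hlt; exact_mod_cast hlt)] at hh
      exact hh
    · exact Or.inl (le_of_not_gt (by simpa using hlt))

lemma emptyRows_eq (lines : List String) :
    ((PySem.List.enumerate lines 0).filter
        (fun yl => !(yl.2.toList.contains '#'))).map (·.1)
      = (PySem.List.pyRange 0 (PySem.List.len lines) 1).filter
          (fun j => !((PySem.List.pyGetD lines j "").toList.contains '#')) := by
  rw [PySem.List.enumerate_eq_map_pyRange lines "", List.filter_map, List.map_map,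
    show ((fun (x : Int × String) => x.1) ∘ fun j => (j, PySem.List.pyGetD lines j "")) = id
      from rfl, List.map_id]
  exact List.filter_congr (fun j _ => rfl)

lemma rowB_iff (lines : List String) (j : Int) (hj0 : 0 ≤ j)
    (hjh : j < (lines.length : Int)) :
    ((!((PySem.List.pyGetD lines j "").toList.contains '#')) = true)
      ↔ j ∉ (pvCells lines 0).map (·.2) := by
  rw [mem_cellYs]
  have hjn : j.toNat < lines.length := by omega
  rw [PySem.List.pyGetD_eq_getElem lines "" hj0 (by exact_mod_cast hjh)]
  simp only [Bool.not_eq_eq_eq_not, Bool.not_true, List.contains_eq_mem,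
    decide_eq_false_iff_not]
  constructor
  · rintro h ⟨r, hr, hjr, hh⟩
    have : r = j.toNat := by omega
    subst this
    exact h hh
  · intro h hh
    exact h ⟨j.toNat, hjn, by omega, hh⟩

lemma pv_count_eq (S cells' : List Int) (colB : Int → Bool) (w x : Int)
    (hx0 : 0 ≤ x) (hxw : x < w) (hxcell : x ∈ cells')
    (hS : ∀ j, j ∈ S ↔ (0 ≤ j ∧ j < w) ∧ j ∉ cells')
    (hB : ∀ j, 0 ≤ j → j < w → (colB j = true ↔ j ∉ cells')) :
    pvCnt S (x + 1)
      = ((((PySem.List.pyRange 0 w 1).filter colB).filter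
          (fun e => decide (e < x))).length : Int) := by
  have hxS : x ∉ S := fun hx => ((hS x).mp hx).2 hxcell
  rw [pvCnt, PySem.List.pyRange_one_succ_right hx0, List.countP_append,
    List.filter_filter, ← List.countP_eq_length_filter,
    PySem.List.pyRange_one_append 0 x w hx0 (le_of_lt hxw), List.countP_append]
  have h1 : List.countP (fun j => decide (j ∈ S)) [x] = 0 := by simp [hxS]
  have h2 : List.countP (fun a => decide (a < x) && colB a)
      (PySem.List.pyRange x w 1) = 0 := by
    rw [List.countP_eq_zero]
    intro a ha
    rw [PySem.List.mem_pyRange_one] at ha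
    simp [not_lt.mpr ha.1]
  have h3 : List.countP (fun j => decide (j ∈ S)) (PySem.List.pyRange 0 x 1)
      = List.countP (fun a => decide (a < x) && colB a) (PySem.List.pyRange 0 x 1) := by
    refine List.countP_congr (fun j hj => ?_)
    rw [PySem.List.mem_pyRange_one] at hj
    have hjw : j < w := lt_trans hj.2 hxw
    simp only [decide_eq_true_eq, Bool.and_eq_true, hS, hB j hj.1 hjw]
    constructor
    · rintro ⟨_, hnc⟩; exact ⟨by simpa using hj.2, hnc⟩
    · rintro ⟨_, hnc⟩; exact ⟨⟨hj.1, hjw⟩, hnc⟩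
  rw [h1, h2, h3]

lemma pv_cell_facts (lines : List String) (p : Int × Int) (hp : p ∈ pvCells lines 0) :
    (0 ≤ p.1 ∧ p.1 ∈ (pvCells lines 0).map (·.1)) ∧
    (0 ≤ p.2 ∧ p.2 < (lines.length : Int) ∧ p.2 ∈ (pvCells lines 0).map (·.2)) := by
  obtain ⟨r, hr, h2, k, hk, h1, hh⟩ := (mem_pvCells lines p).mp hp
  refine ⟨⟨by rw [h1]; positivity, List.mem_map.mpr ⟨p, hp, rfl⟩⟩,
    by rw [h2]; positivity, by rw [h2]; exact_mod_cast hr, List.mem_map.mpr ⟨p, hp, rfl⟩⟩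

lemma pv_cell_lt_w (lines : List String) (p : Int × Int) (hp : p ∈ pvCells lines 0)
    (hpre : ∀ line ∈ lines, '#' ∉ line.toList.drop (lines.headD "").toList.length) :
    p.1 < ((lines.headD "").toList.length : Int) := by
  obtain ⟨r, hr, h2, k, hk, h1, hh⟩ := (mem_pvCells lines p).mp hp
  set W := (lines.headD "").toList.length with hW
  have hline : lines[r] ∈ lines := List.getElem_mem hr
  by_contra hge
  rw [h1] at hge
  push Not at hge
  have hkW : W ≤ k := by omega
  have hidx : k - W < ((lines[r]).toList.drop W).length := by
    rw [List.length_drop]; omega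
  have hget : ((lines[r]).toList.drop W)[k - W]'hidx = '#' := by
    rw [List.getElem_drop]
    simp only [Nat.add_sub_cancel' hkW]
    exact hh
  exact hpre lines[r] hline (hget ▸ List.getElem_mem hidx)


lemma A_eq (lines : List String) (offset : Int) :
    parse lines offset
      = ((pvCells lines 0).map (fun p => [p.1, p.2])).map (fun g =>
          let x := PySem.List.pyGetD g 0 0
          let y := PySem.List.pyGetD g 1 0
          [x + PySem.List.pyGetD (cumulative
              ((pvCells lines 0).foldl (fun t p => PySem.Set.discard t p.1)
                (PySem.Set.ofList (PySem.List.pyRange 0 (PySem.Str.len (lines.headD "")) 1)))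
              (PySem.Str.len (lines.headD "")) offset) x 0,
           y + PySem.List.pyGetD (cumulative
              ((pvCells lines 0).foldl (fun t p => PySem.Set.discard t p.2)
                (PySem.Set.ofList (PySem.List.pyRange 0 (PySem.List.len lines) 1)))
              (PySem.List.len lines) offset) y 0]) := by
  simp only [parse]
  rw [pv_scan]
  simp

lemma B_eq (lines : List String) (offset : Int) :
    parse_alt lines offset
      = (pvCells lines 0).map (fun p =>
          [p.1 + offset * ((((PySem.List.pyRange 0 (PySem.Str.len (lines.headD "")) 1).filter
              (fun c => lines.all (fun line =>
                decide (PySem.Str.len line ≤ c) ||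
                  decide (PySem.List.pyGetD line.toList c ' ' ≠ '#')))).filter
              (fun e => decide (e < p.1))).length : Int),
           p.2 + offset * ((((PySem.List.enumerate lines 0).filter
                (fun yl => !(yl.2.toList.contains '#'))).map (·.1)).filter
              (fun r => decide (r < p.2))).length]) := by
  simp only [parse_alt]
  simp only [PySem.List.foldl_append_ite (fun (xc : Int × Char) => xc.2 = '#'),
    PySem.List.foldl_append_eq_flatMap, List.nil_append]
  rw [pvCells, List.map_flatMap]
  congr 1
  funext yl
  rw [pvRowCells, List.map_map]
  exact List.map_congr_left (fun xc _ => rfl)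

lemma pyGetD_pair0 (a b : Int) : PySem.List.pyGetD [a, b] 0 0 = a := by
  simp [PySem.List.pyGetD, PySem.List.pyGet?, PySem.List.pyIdx?]

lemma pyGetD_pair1 (a b : Int) : PySem.List.pyGetD [a, b] 1 0 = b := by
  simp [PySem.List.pyGetD, PySem.List.pyGet?, PySem.List.pyIdx?]

theorem pv_main (lines : List String) (offset : Int)
    (hpre : ∀ line ∈ lines, '#' ∉ line.toList.drop (lines.headD "").toList.length) :
    parse lines offset = parse_alt lines offset := by
  rw [A_eq, B_eq, List.map_map]
  refine List.map_congr_left (fun p hp => ?_)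
  obtain ⟨⟨hx0, hxmem⟩, hy0, hyh, hymem⟩ := pv_cell_facts lines p hp
  have hxw := pv_cell_lt_w lines p hp hpre
  simp only [Function.comp, pyGetD_pair0, pyGetD_pair1]
  rw [emptyRows_eq, PySem.Str.len_eq, PySem.List.len_eq]
  have hSx : ∀ j, j ∈ (pvCells lines 0).foldl (fun t q => PySem.Set.discard t q.1)
      (PySem.Set.ofList (PySem.List.pyRange 0 ((lines.headD "").toList.length : Int) 1)) ↔
      (0 ≤ j ∧ j < ((lines.headD "").toList.length : Int)) ∧
        j ∉ (pvCells lines 0).map (·.1) := by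
    intro j
    rw [mem_foldl_discard (pvCells lines 0) (fun q => q.1)
        (PySem.Set.ofList (PySem.List.pyRange 0 ((lines.headD "").toList.length : Int) 1)) j,
      PySem.Set.ofList_eq_self_of_nodup _ (PySem.List.nodup_pyRange_one 0 _),
      PySem.List.mem_pyRange_one]
    simp only [List.mem_map, not_exists]
    constructor
    · rintro ⟨hr, hne⟩
      exact ⟨hr, fun p' hcon => hne p' hcon.1 hcon.2.symm⟩
    · rintro ⟨hr, hnm⟩
      exact ⟨hr, fun p' hp' he => hnm p' ⟨hp', he.symm⟩⟩
  have hSy : ∀ j, j ∈ (pvCells lines 0).foldl (fun t q => PySem.Set.discard t q.2)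
      (PySem.Set.ofList (PySem.List.pyRange 0 (lines.length : Int) 1)) ↔
      (0 ≤ j ∧ j < (lines.length : Int)) ∧
        j ∉ (pvCells lines 0).map (·.2) := by
    intro j
    rw [mem_foldl_discard (pvCells lines 0) (fun q => q.2)
        (PySem.Set.ofList (PySem.List.pyRange 0 (lines.length : Int) 1)) j,
      PySem.Set.ofList_eq_self_of_nodup _ (PySem.List.nodup_pyRange_one 0 _),
      PySem.List.mem_pyRange_one]
    simp only [List.mem_map, not_exists]
    constructor
    · rintro ⟨hr, hne⟩
      exact ⟨hr, fun p' hcon => hne p' hcon.1 hcon.2.symm⟩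
    · rintro ⟨hr, hnm⟩
      exact ⟨hr, fun p' hp' he => hnm p' ⟨hp', he.symm⟩⟩
  rw [cum_get _ offset _ p.1 hx0 hxw, cum_get _ offset _ p.2 hy0 hyh,
    pv_count_eq _ _ _ _ p.1 hx0 hxw hxmem hSx (fun j hj _ => colB_iff lines j hj),
    pv_count_eq _ _ _ _ p.2 hy0 hyh hymem hSy
      (fun j hj0 hjh => rowB_iff lines j hj0 hjh)]

-- ===== VERDICT (by name: the statement is the Claim_ definition above) =====
theorem parse_spec : Claim_equal_parse := by
  intro lines offset _ hpre
  unfold Spec_parse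
  exact pv_main lines offset hpre.2
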